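-- pv_equiv track=rewrite | github.com/TaylorNeller/TUBSTAP_Taylor | Taylor/port/Logger.py | search_one
-- ===== SOURCE A (Python) =====
-- def search_one(src, tag):
--     """Search for the content (e.g., User) from the tag (e.g., PB[User])"""
--     idx = src.find(tag + "[")
--     if idx == -1:
--         return ""
--     idx_to = idx + len(tag) + 1
--     idx = idx_to
--     while True:
--         if idx_to == len(src):
--             return ""
--         if src[idx_to] == "]":
--             return src[idx:idx_to]
--         idx_to += 1
-- ===== SOURCE B (Python) =====
-- import re
--
-- def search_one(src, tag):
--     """Search for the content (e.g., User) from the tag (e.g., PB[User])"""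
--     m = re.search(re.escape(tag) + r'\[([^\]]*)\]', src)
--     return m.group(1) if m else ""
-- ===== Notes on version B (the rewrite author's own statement) =====
-- stated objective: idiomatic
-- what changed: B replaces A's find-then-manual-index-scan with a single regular-expression search (escaped tag, a [^\]]* capture group, a required closing bracket), delegating both the localisation and the extraction to the re engine.
import Mathlib
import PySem

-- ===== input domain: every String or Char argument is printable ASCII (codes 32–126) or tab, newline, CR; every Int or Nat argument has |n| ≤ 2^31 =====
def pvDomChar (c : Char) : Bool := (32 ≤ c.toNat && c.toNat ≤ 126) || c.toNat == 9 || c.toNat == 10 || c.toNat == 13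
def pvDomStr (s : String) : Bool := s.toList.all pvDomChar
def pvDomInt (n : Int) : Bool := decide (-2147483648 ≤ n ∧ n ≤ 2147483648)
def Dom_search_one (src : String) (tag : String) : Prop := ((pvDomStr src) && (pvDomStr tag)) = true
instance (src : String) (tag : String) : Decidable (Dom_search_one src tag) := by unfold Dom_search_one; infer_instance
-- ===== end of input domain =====

-- B replaces A's find-then-manual-index-scan with a single re.search of
-- escaped-tag + '\[([^\]]*)\]' (idiomatic; return value only, no side effects).

-- ===== PORT A =====
-- A's while-loop: scan from idx_to for ']'; '' at end of string.
-- (the ≥ in the guard only totalizes the port: reachable states have idx_to ≤ s.length,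
--  where it coincides with Python's 'idx_to == len(src)')
def searchOneLoopA (s : List Char) (idx : Nat) (idx_to : Nat) : String :=
  if s.length ≤ idx_to then ""
  else if PySem.List.pyGet? s (idx_to : Int) = some ']' then
    String.ofList (PySem.List.slice s (some (idx : Int)) (some (idx_to : Int)))
  else searchOneLoopA s idx (idx_to + 1)
termination_by s.length - idx_to

def search_one (src : String) (tag : String) : String :=
  let s := src.toList
  let t := tag.toList
  let idx := PySem.Chars.find s (t ++ ['['])
  if idx = -1 then ""
  else searchOneLoopA s (idx.toNat + t.length + 1) (idx.toNat + t.length + 1)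

-- ===== PORT B =====
-- Hand port of Source B's re.search for the fixed pattern re.escape(tag) + '\[([^\]]*)\]'.
-- It is exact for this pattern: re.search tries start positions left to right; at each
-- position the match is the literal tag, then '[', then the greedy class [^\]]* (which,
-- excluding ']', matches exactly takeWhile (· ≠ ']') with no useful backtracking),
-- then a mandatory ']'. re.escape only makes tag literal, which the ++ below is.
-- the greedy class [^\]]* consumes via takeWhile/dropWhile; then ']' is required
def reCapture (rest' : List Char) : Option (List Char) :=
  match rest'.dropWhile (· ≠ ']') with
  | ']' :: _ => some (rest'.takeWhile (· ≠ ']'))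
  | _ => none

def reMatchAt (rest : List Char) (t : List Char) : Option (List Char) :=
  if (t ++ ['[']).isPrefixOf rest then
    reCapture (rest.drop (t.length + 1))
  else none

def reSearchLoop (s : List Char) (t : List Char) (i : Nat) : String :=
  if s.length < i then ""
  else
    match reMatchAt (s.drop i) t with
    | some content => String.ofList content
    | none => reSearchLoop s t (i + 1)
termination_by s.length + 1 - i

def search_one_alt (src : String) (tag : String) : String :=
  reSearchLoop src.toList tag.toList 0

-- ===== PRECONDITION & SPEC =====
def Spec_search_one (src : String) (tag : String) (out : String) : Prop := out = search_one_alt src tag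
instance (src : String) (tag : String) (out : String) : Decidable (Spec_search_one src tag out) := by unfold Spec_search_one; infer_instance

-- ===== CLAIM (what is proved, stated in full; the proofs are below) =====
def Claim_equal_search_one : Prop := ∀ (src : String) (tag : String), Dom_search_one src tag → Spec_search_one src tag (search_one src tag)

-- ===== LEMMAS AND PROOFS =====

-- A's scan loop, characterised by takeWhile: it slices up to the first ']' at or
-- after k, or returns "" when there is none.
lemma loopA_takeWhile (s : List Char) :
    ∀ n k idx, k ≤ s.length → s.length - k = n → idx ≤ k →
    searchOneLoopA s idx k =
      (let c := (s.drop k).takeWhile (· ≠ ']');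
       if k + c.length < s.length then
         String.ofList (PySem.List.slice s (some (idx : Int)) (some ((k + c.length : Nat) : Int)))
       else "") := by
  intro n
  induction n with
  | zero =>
    intro k idx hk hn _
    have hk' : k = s.length := by omega
    subst hk'
    rw [searchOneLoopA]
    simp
  | succ n ih =>
    intro k idx hk hn hidx
    have hlt : k < s.length := by omega
    rw [searchOneLoopA]
    simp only [Nat.not_le.mpr hlt, if_false]
    have hget : PySem.List.pyGet? s ((k : Nat) : Int) = s[k]? :=
      PySem.List.pyGet?_natCast s k
    have hdropk : s.drop k = s[k] :: s.drop (k + 1) := List.drop_eq_getElem_cons hlt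
    by_cases hc : s[k] = ']'
    · rw [if_pos (by rw [hget, List.getElem?_eq_getElem hlt, hc])]
      have hcw : (s.drop k).takeWhile (· ≠ ']') = [] := by
        rw [hdropk, hc, List.takeWhile_cons]
        simp
      simp only [hcw, List.length_nil, Nat.add_zero]
      rw [if_pos hlt]
    · have hne : ¬ PySem.List.pyGet? s ((k : Nat) : Int) = some ']' := by
        rw [hget, List.getElem?_eq_getElem hlt]
        simp [hc]
      rw [if_neg hne, ih (k + 1) idx hlt (by omega) (by omega)]
      have hcw : (s.drop k).takeWhile (· ≠ ']')
          = s[k] :: (s.drop (k + 1)).takeWhile (· ≠ ']') := by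
        rw [hdropk, List.takeWhile_cons, if_pos (by simpa using hc)]
      simp only [hcw, List.length_cons]
      have harith : k + 1 + ((s.drop (k + 1)).takeWhile (· ≠ ']')).length
          = k + (((s.drop (k + 1)).takeWhile (· ≠ ']')).length + 1) := by omega
      rw [harith]

-- B's search loop returns "" when no position from i on matches
lemma reLoop_none (s t : List Char) :
    ∀ n i, s.length + 1 - i = n → (∀ j, i ≤ j → reMatchAt (s.drop j) t = none) →
    reSearchLoop s t i = "" := by
  intro n
  induction n with
  | zero =>
    intro i hn _
    rw [reSearchLoop]
    simp only [if_pos (by omega : s.length < i)]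
  | succ n ih =>
    intro i hn hnone
    rw [reSearchLoop]
    split
    · rfl
    · rw [hnone i le_rfl]
      exact ih (i + 1) (by omega) (fun j hj => hnone j (by omega))

-- B's search loop skips non-matching positions
lemma reLoop_skip (s t : List Char) :
    ∀ n i m, m - i = n → i ≤ m → (∀ j, i ≤ j → j < m → reMatchAt (s.drop j) t = none) →
    m ≤ s.length →
    reSearchLoop s t i = reSearchLoop s t m := by
  intro n
  induction n with
  | zero =>
    intro i m hn hle _ _
    have : i = m := by omega
    rw [this]
  | succ n ih =>
    intro i m hn hle hnone hm
    have hilt : i < m := by omega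
    rw [reSearchLoop]
    rw [if_neg (by omega : ¬ s.length < i)]
    rw [hnone i le_rfl hilt]
    exact ih (i + 1) m (by omega) (by omega) (fun j hj hjm => hnone j (by omega) hjm) hm

-- no occurrence of t ++ '[' at or after position i ⇒ reMatchAt fails there;
-- also fails at a matching position when no ']' follows the bracket
lemma reMatchAt_none_of_no_prefix (s t : List Char) (j : Nat)
    (h : ¬ (t ++ ['[']) <+: s.drop j) : reMatchAt (s.drop j) t = none := by
  rw [reMatchAt, if_neg (by simpa using h)]

lemma reMatchAt_none_of_no_rbracket (rest t : List Char)
    (h : ']' ∉ rest.drop (t.length + 1)) : reMatchAt rest t = none := by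
  rw [reMatchAt]
  split
  · rw [reCapture]
    have hall : (rest.drop (t.length + 1)).dropWhile (· ≠ ']') = [] := by
      rw [List.dropWhile_eq_nil_iff]
      intro a ha
      simp only [decide_eq_true_eq]
      intro hcontra
      exact h (hcontra ▸ ha)
    rw [hall]
  · rfl

-- ===== VERDICT (by name: the statement is the Claim_ definition above) =====
theorem search_one_spec : Claim_equal_search_one := by
  intro src tag _
  unfold Spec_search_one search_one search_one_alt
  simp only []
  set s := src.toList with hs
  set t := tag.toList with ht
  set idx := PySem.Chars.find s (t ++ ['[']) with hidx
  by_cases h : idx = -1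
  · rw [if_pos h]
    have hnin : ¬ (t ++ ['[']) <:+: s := (PySem.Chars.find_eq_neg_one_iff _ _).mp h
    refine (reLoop_none s t _ 0 rfl ?_).symm
    intro j _
    apply reMatchAt_none_of_no_prefix
    intro hp
    exact hnin (hp.isInfix.trans (List.drop_suffix j s).isInfix)
  · rw [if_neg h]
    have h0 : 0 ≤ idx := by have := PySem.Chars.neg_one_le_find s (t ++ ['[']); omega
    obtain ⟨hp, hmin⟩ := PySem.Chars.find_spec h0
    set m := idx.toNat with hm
    set p := m + t.length + 1 with hpdef
    have hlen : p ≤ s.length := by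
      have := hp.length_le
      simp [List.length_drop] at this
      omega
    -- the rest after the bracket, at the match position
    have hdd : (s.drop m).drop (t.length + 1) = s.drop p := by
      rw [List.drop_drop]
      congr 1
    rw [loopA_takeWhile s (s.length - p) p p hlen rfl le_rfl]
    set c := (s.drop p).takeWhile (· ≠ ']') with hc
    have hskip : reSearchLoop s t 0 = reSearchLoop s t m := by
      apply reLoop_skip s t m 0 m rfl (by omega) ?_ (by omega)
      intro j _ hjm
      exact reMatchAt_none_of_no_prefix s t j (hmin j hjm)
    by_cases hbr : p + c.length < s.length
    · -- a ']' exists: both return the slice / capture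
      simp only [if_pos hbr]
      rw [hskip, reSearchLoop, if_neg (by omega : ¬ s.length < m)]
      have hmatch : reMatchAt (s.drop m) t = some c := by
        rw [reMatchAt, if_pos (by simpa using hp), hdd, reCapture]
        have hdwne : (s.drop p).dropWhile (fun x => decide (x ≠ ']')) ≠ [] := by
          intro hnil
          have hceq : c = s.drop p := by
            have h1 := List.takeWhile_append_dropWhile (p := fun x => decide (x ≠ ']')) (l := s.drop p)
            rw [hnil, List.append_nil] at h1
            rw [hc, h1]
          rw [hceq] at hbr
          simp [List.length_drop] at hbr
          omega
        obtain ⟨hd, tl, hdw⟩ := List.exists_cons_of_ne_nil hdwne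
        have hhd : hd = ']' := by
          have h1 := List.head_dropWhile_not (p := fun x => decide (x ≠ ']'))
            (l := s.drop p) (by rw [hdw]; simp)
          simp only [hdw, List.head_cons] at h1
          simpa using h1
        rw [hhd] at hdw
        rw [hdw, hc]
        rfl
      rw [hmatch]
      -- A's slice equals the capture
      have hslice : PySem.List.slice s (some ((p : Nat) : Int)) (some ((p + c.length : Nat) : Int))
          = (s.drop p).take c.length := by
        rw [PySem.List.slice_natCast]
        congr 1
        omega
      rw [hslice]
      have htk : (s.drop p).take c.length = c := by
        have hpref : c <+: s.drop p := by rw [hc]; exact List.takeWhile_prefix _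
        obtain ⟨r, hr⟩ := hpref
        rw [← hr, List.take_left]
      rw [htk]
    · -- no ']' at or after p: both return ""
      simp only [if_neg hbr]
      have hcall : c = s.drop p := by
        have hle : (s.drop p).length ≤ c.length := by
          simp only [List.length_drop]
          omega
        have hpref : c <+: s.drop p := by rw [hc]; exact List.takeWhile_prefix _
        exact List.IsPrefix.eq_of_length_le hpref (by
          have := hpref.length_le
          omega)
      have hnobr : ']' ∉ s.drop p := by
        intro hmem
        have : ¬ (']' ∈ c) := by
          intro hmc
          have := List.mem_takeWhile_imp (hc ▸ hmc)
          simp at this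
        exact this (hcall ▸ hmem)
      rw [hskip]
      refine (reLoop_none s t _ m rfl ?_).symm
      intro j hj
      by_cases hpj : (t ++ ['[']) <+: s.drop j
      · apply reMatchAt_none_of_no_rbracket
        intro hmem
        apply hnobr
        have hjd : (s.drop j).drop (t.length + 1) = s.drop (j + (t.length + 1)) := by
          rw [List.drop_drop]
        rw [hjd] at hmem
        have : s.drop (j + (t.length + 1)) = (s.drop p).drop (j + (t.length + 1) - p) := by
          rw [List.drop_drop]; congr 1; omega
        rw [this] at hmem
        exact List.mem_of_mem_drop hmem
      · exact reMatchAt_none_of_no_prefix s t j hpj
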